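-- pv_equiv track=rewrite | github.com/Coding-Simba/bank-statement-converter-unified | backend/parsers/suntrust_parser.py | is_suntrust_debit
-- ===== SOURCE A (Python) =====
-- def is_suntrust_debit(description: str, full_line: str) -> bool:
--     """Determine if SunTrust transaction is a debit"""
--     desc_lower = description.lower()
--     line_lower = full_line.lower()
--
--     # SunTrust credit indicators
--     credit_keywords = ['deposit', 'credit', 'transfer credit']
--
--     # SunTrust debit indicators
--     debit_keywords = ['debit', 'purchase', 'payment', 'withdrawal']
--
--     # Check credits first
--     for keyword in credit_keywords:
--         if keyword in desc_lower or keyword in line_lower: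
--             return False
--
--     # Then debits
--     for keyword in debit_keywords:
--         if keyword in desc_lower or keyword in line_lower:
--             return True
--
--     # Default to debit
--     return True
-- ===== SOURCE B (Python) =====
-- def is_suntrust_debit(description: str, full_line: str) -> bool:
--     """Determine if SunTrust transaction is a debit"""
--     desc_lower = description.lower()
--     line_lower = full_line.lower()
--     # Everything that is not a credit is a debit; 'transfer credit' is
--     # subsumed by 'credit', so two keywords suffice.
--     return not any(k in desc_lower or k in line_lower for k in ("deposit", "credit"))
-- ===== Notes on version B (the rewrite author's own statement) =====
-- stated objective: simpler
-- what changed: A's second (debit-keyword) loop is dead code and the 'transfer credit' keyword is subsumed by 'credit'; B replaces the two sequential loops by a single negated any() over the two effective credit keywords.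
import Mathlib
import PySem

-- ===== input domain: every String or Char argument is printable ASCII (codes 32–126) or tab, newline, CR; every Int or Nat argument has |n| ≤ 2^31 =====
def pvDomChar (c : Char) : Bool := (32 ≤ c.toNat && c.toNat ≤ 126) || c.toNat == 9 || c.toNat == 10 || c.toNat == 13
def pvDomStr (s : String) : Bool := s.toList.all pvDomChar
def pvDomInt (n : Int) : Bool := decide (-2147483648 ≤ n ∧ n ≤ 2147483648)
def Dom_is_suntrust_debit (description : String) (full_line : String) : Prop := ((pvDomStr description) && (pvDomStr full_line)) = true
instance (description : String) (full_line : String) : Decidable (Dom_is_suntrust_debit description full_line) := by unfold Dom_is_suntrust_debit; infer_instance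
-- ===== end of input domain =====

-- B replaces A's two sequential keyword loops (the second of which is dead code)
-- by a single negated `any` over the two effective credit keywords (objective: simpler).

-- ===== PORT A =====
def is_suntrust_debit (description : String) (full_line : String) : Bool :=
  let desc_lower := PySem.Str.lower description
  let line_lower := PySem.Str.lower full_line
  let credit_keywords := ["deposit", "credit", "transfer credit"]
  let debit_keywords := ["debit", "purchase", "payment", "withdrawal"]
  -- first loop: early-return False on a credit keyword
  if credit_keywords.any (fun keyword =>
      PySem.Str.isIn keyword desc_lower || PySem.Str.isIn keyword line_lower) then
    false
  -- second loop: early-return True on a debit keyword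
  else if debit_keywords.any (fun keyword =>
      PySem.Str.isIn keyword desc_lower || PySem.Str.isIn keyword line_lower) then
    true
  else
    -- default to debit
    true

-- ===== PORT B =====
def is_suntrust_debit_alt (description : String) (full_line : String) : Bool :=
  let desc_lower := PySem.Str.lower description
  let line_lower := PySem.Str.lower full_line
  !(["deposit", "credit"].any (fun k =>
      PySem.Str.isIn k desc_lower || PySem.Str.isIn k line_lower))

-- ===== PRECONDITION & SPEC =====
def Spec_is_suntrust_debit (description : String) (full_line : String) (out : Bool) : Prop := out = is_suntrust_debit_alt description full_line
instance (description : String) (full_line : String) (out : Bool) : Decidable (Spec_is_suntrust_debit description full_line out) := by unfold Spec_is_suntrust_debit; infer_instance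

-- ===== CLAIM (what is proved, stated in full; the proofs are below) =====
def Claim_equal_is_suntrust_debit : Prop := ∀ (description : String) (full_line : String), Dom_is_suntrust_debit description full_line → Spec_is_suntrust_debit description full_line (is_suntrust_debit description full_line)

-- ===== LEMMAS AND PROOFS =====

-- if 'credit' is not in s then neither is 'transfer credit' (infix transitivity, contrapositive)
theorem no_transfer_credit_of_no_credit (s : String)
    (h : PySem.Str.isIn "credit" s = false) :
    PySem.Str.isIn "transfer credit" s = false := by
  cases ht : PySem.Str.isIn "transfer credit" s with
  | false => rfl
  | true =>
    rw [PySem.Str.isIn_iff_infix] at ht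
    have hc : PySem.Str.isIn "credit" s = true :=
      (PySem.Str.isIn_iff_infix _ _).mpr (List.IsInfix.trans (by decide) ht)
    rw [hc] at h
    exact h

-- ===== VERDICT (by name: the statement is the Claim_ definition above) =====
theorem is_suntrust_debit_spec : Claim_equal_is_suntrust_debit := by
  intro d l _
  unfold Spec_is_suntrust_debit is_suntrust_debit is_suntrust_debit_alt
  simp only [List.any_cons, List.any_nil, Bool.or_false, ite_self]
  by_cases hcd : PySem.Str.isIn "credit" (PySem.Str.lower d) = true
  · rw [hcd]
    cases PySem.Str.isIn "deposit" (PySem.Str.lower d) <;>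
      cases PySem.Str.isIn "deposit" (PySem.Str.lower l) <;> simp
  · rw [Bool.not_eq_true] at hcd
    by_cases hcl : PySem.Str.isIn "credit" (PySem.Str.lower l) = true
    · rw [hcl]
      cases PySem.Str.isIn "deposit" (PySem.Str.lower d) <;>
        cases PySem.Str.isIn "deposit" (PySem.Str.lower l) <;> simp
    · rw [Bool.not_eq_true] at hcl
      rw [hcd, hcl, no_transfer_credit_of_no_credit _ hcd,
        no_transfer_credit_of_no_credit _ hcl]
      cases PySem.Str.isIn "deposit" (PySem.Str.lower d) <;>
        cases PySem.Str.isIn "deposit" (PySem.Str.lower l) <;> simp
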